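-- pv_equiv track=rewrite | github.com/andrea00mauro00/marine-pollution-tracking | pollution_detector/services/hotspot_manager.py | _is_same_pollutant_type
-- ===== SOURCE A (Python) =====
-- def _is_same_pollutant_type(type1, type2):
--     """Verifica se due tipi di inquinanti sono considerati equivalenti"""
--     if type1 == type2:
--         return True
--
--     # Mappa di sinonimi per i tipi di inquinanti
--     synonyms = {
--         "oil": ["oil_spill", "crude_oil", "petroleum"],
--         "chemical": ["chemical_spill", "toxic_chemicals"],
--         "sewage": ["waste_water", "sewage_discharge"],
--         "plastic": ["microplastics", "plastic_debris"],
--         "algae": ["algal_bloom", "red_tide"]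
--     }
--
--     # Controlla se i tipi sono sinonimi
--     for category, types in synonyms.items():
--         if (type1 == category or type1 in types) and (type2 == category or type2 in types):
--             return True
--
--     return False
-- ===== SOURCE B (Python) =====
-- # B: precomputed reverse-lookup dict (string -> canonical category) + two O(1) lookups,
-- # instead of A's per-call loop over categories with double membership tests.
-- _CANON = {}
-- for _cat, _syns in {
--     "oil": ["oil_spill", "crude_oil", "petroleum"],
--     "chemical": ["chemical_spill", "toxic_chemicals"],
--     "sewage": ["waste_water", "sewage_discharge"],
--     "plastic": ["microplastics", "plastic_debris"],
--     "algae": ["algal_bloom", "red_tide"],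
-- }.items():
--     _CANON[_cat] = _cat
--     for _s in _syns:
--         _CANON[_s] = _cat
--
--
-- def _is_same_pollutant_type(type1, type2):
--     """Verifica se due tipi di inquinanti sono considerati equivalenti"""
--     if type1 == type2:
--         return True
--     c1 = _CANON.get(type1)
--     c2 = _CANON.get(type2)
--     return c1 is not None and c1 == c2
-- ===== Notes on version B (the rewrite author's own statement) =====
-- stated objective: idiomatic
-- what changed: Replaced the per-call loop over categories with double membership tests by a module-level reverse-lookup dict mapping every name (category and synonym) to its canonical category, so the body is two dict lookups and a comparison.
import Mathlib
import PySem

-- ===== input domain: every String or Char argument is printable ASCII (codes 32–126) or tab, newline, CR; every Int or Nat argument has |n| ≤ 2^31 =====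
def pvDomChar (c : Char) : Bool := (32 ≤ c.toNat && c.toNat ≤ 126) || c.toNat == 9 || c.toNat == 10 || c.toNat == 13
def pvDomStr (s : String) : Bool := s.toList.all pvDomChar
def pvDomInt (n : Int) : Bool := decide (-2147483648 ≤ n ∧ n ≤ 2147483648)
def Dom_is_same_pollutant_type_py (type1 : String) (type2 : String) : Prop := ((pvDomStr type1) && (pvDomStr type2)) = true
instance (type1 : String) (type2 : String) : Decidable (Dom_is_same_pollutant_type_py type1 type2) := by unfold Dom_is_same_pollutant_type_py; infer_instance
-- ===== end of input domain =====

-- B replaces A's per-call loop over the synonym table (double membership test per category)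
-- by a precomputed reverse-lookup dict (name -> canonical category) and two lookups.

-- ===== PORT A =====
-- the synonyms dict of A (literal, insertion order)
def pvSynonyms : List (String × List String) :=
  [("oil", ["oil_spill", "crude_oil", "petroleum"]),
   ("chemical", ["chemical_spill", "toxic_chemicals"]),
   ("sewage", ["waste_water", "sewage_discharge"]),
   ("plastic", ["microplastics", "plastic_debris"]),
   ("algae", ["algal_bloom", "red_tide"])]

def is_same_pollutant_type_py (type1 : String) (type2 : String) : Bool :=
  if type1 == type2 then true
  else if pvSynonyms.any (fun p =>
      (type1 == p.1 || p.2.contains type1) && (type2 == p.1 || p.2.contains type2)) then true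
  else false

-- ===== PORT B =====
-- module-level reverse map _CANON, built by Source B's loop over the same table
def pvCanon : PySem.Dict String String :=
  pvSynonyms.foldl (fun d p => (p.2.foldl (fun d s => d.insert s p.1) (d.insert p.1 p.1))) PySem.Dict.empty

def is_same_pollutant_type_py_alt (type1 : String) (type2 : String) : Bool :=
  if type1 == type2 then true
  else
    let c1 := pvCanon.get? type1
    let c2 := pvCanon.get? type2
    c1.isSome && c1 == c2

-- ===== PRECONDITION & SPEC =====
def Spec_is_same_pollutant_type_py (type1 : String) (type2 : String) (out : Bool) : Prop := out = is_same_pollutant_type_py_alt type1 type2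
instance (type1 : String) (type2 : String) (out : Bool) : Decidable (Spec_is_same_pollutant_type_py type1 type2 out) := by unfold Spec_is_same_pollutant_type_py; infer_instance

-- ===== CLAIM (what is proved, stated in full; the proofs are below) =====
def Claim_equal_is_same_pollutant_type_py : Prop := ∀ (type1 : String) (type2 : String), Dom_is_same_pollutant_type_py type1 type2 → Spec_is_same_pollutant_type_py type1 type2 (is_same_pollutant_type_py type1 type2)

-- ===== LEMMAS AND PROOFS =====

-- every name appearing anywhere in the table
def pvKnown : List String :=
  ["oil", "oil_spill", "crude_oil", "petroleum",
   "chemical", "chemical_spill", "toxic_chemicals",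
   "sewage", "waste_water", "sewage_discharge",
   "plastic", "microplastics", "plastic_debris",
   "algae", "algal_bloom", "red_tide"]

-- when the right argument is unknown, A's any-loop finds nothing
lemma pvA_any_false_right {t2 : String} (h : t2 ∉ pvKnown) (t1 : String) :
    (pvSynonyms.any (fun p =>
      (t1 == p.1 || p.2.contains t1) && (t2 == p.1 || p.2.contains t2))) = false := by
  simp [pvKnown] at h
  obtain ⟨h1, h2, h3, h4, h5, h6, h7, h8, h9, h10, h11, h12, h13, h14, h15, h16⟩ := h
  simp [pvSynonyms, List.any, h1, h2, h3, h4, h5, h6, h7, h8, h9, h10, h11, h12, h13, h14, h15, h16]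

-- when the left argument is unknown, A's any-loop finds nothing
lemma pvA_any_false_left {t1 : String} (h : t1 ∉ pvKnown) (t2 : String) :
    (pvSynonyms.any (fun p =>
      (t1 == p.1 || p.2.contains t1) && (t2 == p.1 || p.2.contains t2))) = false := by
  simp [pvKnown] at h
  obtain ⟨h1, h2, h3, h4, h5, h6, h7, h8, h9, h10, h11, h12, h13, h14, h15, h16⟩ := h
  simp [pvSynonyms, List.any, h1, h2, h3, h4, h5, h6, h7, h8, h9, h10, h11, h12, h13, h14, h15, h16]

-- an unknown string is not a key of the reverse map
lemma pvB_unknown {t : String} (h : t ∉ pvKnown) : pvCanon.get? t = none := by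
  simp [pvKnown] at h
  obtain ⟨h1, h2, h3, h4, h5, h6, h7, h8, h9, h10, h11, h12, h13, h14, h15, h16⟩ := h
  simp [pvCanon, pvSynonyms, List.foldl, PySem.Dict.get?_insert, h1, h2, h3, h4, h5, h6, h7,
    h8, h9, h10, h11, h12, h13, h14, h15, h16]

set_option maxRecDepth 8000 in
theorem pv_main (type1 type2 : String) :
    is_same_pollutant_type_py type1 type2 = is_same_pollutant_type_py_alt type1 type2 := by
  by_cases heq : type1 = type2
  · simp [is_same_pollutant_type_py, is_same_pollutant_type_py_alt, heq]
  · by_cases h1 : type1 ∈ pvKnown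
    · by_cases h2 : type2 ∈ pvKnown
      · fin_cases h1 <;> fin_cases h2 <;> decide
      · -- type2 unknown: A's any is false; B's c2 is none (and c1 ≠ none ⇒ c1 ≠ c2)
        have hb := pvB_unknown h2
        simp only [is_same_pollutant_type_py, is_same_pollutant_type_py_alt, beq_iff_eq, heq,
          if_false, hb]
        rw [pvA_any_false_right h2 type1]
        cases hc : pvCanon.get? type1 <;> simp
    · have hb := pvB_unknown h1
      simp only [is_same_pollutant_type_py, is_same_pollutant_type_py_alt, beq_iff_eq, heq,
        if_false, hb]
      rw [pvA_any_false_left h1 type2]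
      simp

-- ===== VERDICT (by name: the statement is the Claim_ definition above) =====
theorem is_same_pollutant_type_py_spec : Claim_equal_is_same_pollutant_type_py := by
  intro type1 type2 _
  unfold Spec_is_same_pollutant_type_py
  exact pv_main type1 type2
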